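-- pv_equiv track=rewrite | github.com/mitsuo0114/competitive_programming | python/atcoder/Beginner108/reC.py | solve
-- ===== SOURCE A (Python) =====
-- def solve(N, K):
--     ans = 0
--     k = len([n for n in range(1, N + 1) if n % K == 0])
--     ans += k * k * k
--     if K % 2 == 0:
--         k = len([n for n in range(1, N + 1) if n % K == K // 2])
--         ans += k * k * k
--
--     return ans
-- ===== SOURCE B (Python) =====
-- def solve(N, K):
--     if N <= 0:
--         return 0
--     m = abs(K)
--     a = N // m
--     ans = a * a * a
--     if K % 2 == 0:
--         b = (N + m // 2) // m
--         ans += b * b * b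
--     return ans
-- ===== Notes on version B (the rewrite author's own statement) =====
-- stated objective: faster
-- what changed: Replaces the two O(N) list-comprehension scans counting residues with closed-form floor-division formulas N//|K| and (N+|K|//2)//|K|.
import Mathlib
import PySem

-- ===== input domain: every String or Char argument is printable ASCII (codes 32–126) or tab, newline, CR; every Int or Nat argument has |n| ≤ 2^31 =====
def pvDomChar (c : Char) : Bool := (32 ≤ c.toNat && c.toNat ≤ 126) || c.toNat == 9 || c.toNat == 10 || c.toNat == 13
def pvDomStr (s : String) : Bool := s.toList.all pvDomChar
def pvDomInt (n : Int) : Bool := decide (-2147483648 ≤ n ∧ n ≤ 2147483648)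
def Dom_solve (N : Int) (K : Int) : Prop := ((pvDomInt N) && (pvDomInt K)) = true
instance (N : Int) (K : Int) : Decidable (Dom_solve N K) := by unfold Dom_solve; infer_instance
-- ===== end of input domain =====

-- B replaces A's two O(N) residue-counting scans by closed-form floor-division formulas (asymptotically faster).


-- ===== PORT A =====
def solve (N : Int) (K : Int) : Int :=
  let ans : Int := 0
  let k : Int := ((PySem.List.pyRange 1 (N + 1) 1).filter
      (fun n => PySem.Int.mod n K == 0)).length
  let ans := ans + k * k * k
  if PySem.Int.mod K 2 == 0 then
    let k : Int := ((PySem.List.pyRange 1 (N + 1) 1).filter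
        (fun n => PySem.Int.mod n K == PySem.Int.floordiv K 2)).length
    ans + k * k * k
  else ans

-- ===== PORT B =====
def solve_alt (N : Int) (K : Int) : Int :=
  if N ≤ 0 then 0
  else
    let m := |K|
    let a := PySem.Int.floordiv N m
    let ans := a * a * a
    if PySem.Int.mod K 2 == 0 then
      let b := PySem.Int.floordiv (N + PySem.Int.floordiv m 2) m
      ans + b * b * b
    else ans

-- ===== PRECONDITION & SPEC =====
-- Pre_ excludes exactly K = 0 with N ≥ 1, where A raises ZeroDivisionError (and B does too).
def Pre_solve (N : Int) (K : Int) : Prop := K ≠ 0 ∨ N ≤ 0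
instance (N : Int) (K : Int) : Decidable (Pre_solve N K) := by unfold Pre_solve; infer_instance
def pvWitness_solve : Int × Int := (10, 4)

def Spec_solve (N : Int) (K : Int) (out : Int) : Prop := out = solve_alt N K
instance (N : Int) (K : Int) (out : Int) : Decidable (Spec_solve N K out) := by unfold Spec_solve; infer_instance

-- ===== CLAIM (what is proved, stated in full; the proofs are below) =====
def Claim_equal_solve : Prop := ∀ (N : Int) (K : Int), Dom_solve N K → Pre_solve N K → Spec_solve N K (solve N K)

-- ===== LEMMAS AND PROOFS =====

-- Python's mod hits a fixed value c in the divisor's window iff K divides n - c.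
lemma pymod_eq_iff_dvd (n K c : Int)
    (hw : (0 < K ∧ 0 ≤ c ∧ c < K) ∨ (K < 0 ∧ K < c ∧ c ≤ 0)) :
    PySem.Int.mod n K = c ↔ K ∣ (n - c) := by
  have hrepr := PySem.Int.floordiv_mul_add_mod n K
  constructor
  · intro h
    exact ⟨PySem.Int.floordiv n K, by rw [mul_comm]; omega⟩
  · rintro ⟨t, ht⟩
    have hd : K ∣ (PySem.Int.mod n K - c) :=
      ⟨t - PySem.Int.floordiv n K, by
        rw [mul_sub, mul_comm K (PySem.Int.floordiv n K)]; omega⟩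
    have hz : PySem.Int.mod n K - c = 0 := by
      rcases hw with ⟨hK, hc0, hcK⟩ | ⟨hK, hcK, hc0⟩
      · have h1 := PySem.Int.mod_nonneg n hK
        have h2 := PySem.Int.mod_lt n hK
        exact Int.eq_zero_of_abs_lt_dvd hd (by rw [abs_lt]; omega)
      · have h1 := PySem.Int.mod_neg_bounds n hK
        have hd' : (-K) ∣ (PySem.Int.mod n K - c) := (neg_dvd).mpr hd
        exact Int.eq_zero_of_abs_lt_dvd hd' (by rw [abs_lt]; omega)
    omega

-- increment rule for ediv: (y+1)/m grows by 1 exactly when m divides y+1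
lemma ediv_succ (y m : Int) (hm : 0 < m) :
    (y + 1) / m = y / m + (if (y + 1) % m = 0 then 1 else 0) := by
  have hrepr := Int.mul_ediv_add_emod y m
  have h1 := Int.emod_nonneg y (show m ≠ 0 by omega)
  have h2 := Int.emod_lt_of_pos y hm
  by_cases hs : y % m + 1 = m
  · have hy : y + 1 = m * (y / m + 1) := by rw [mul_add, mul_one]; omega
    have hdiv : (y + 1) / m = y / m + 1 := by
      rw [hy, Int.mul_ediv_cancel_left _ (show m ≠ 0 by omega)]
    have hz : (y + 1) % m = 0 := by rw [hy]; exact Int.mul_emod_right m _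
    rw [hdiv, hz, if_pos rfl]
  · have hy : y + 1 = (y % m + 1) + m * (y / m) := by omega
    have hdiv : (y + 1) / m = y / m := by
      rw [hy, Int.add_mul_ediv_left _ _ (show m ≠ 0 by omega),
        Int.ediv_eq_zero_of_lt (by omega) (by omega), zero_add]
    have hmod : (y + 1) % m = y % m + 1 := by
      rw [hy, Int.add_mul_emod_self_left, Int.emod_eq_of_lt (by omega) (by omega)]
    rw [hdiv, hmod, if_neg (by omega)]; omega

-- closed form for the count of n in [1, x] with n ≡ r' (mod m), for r' in (0, m]
lemma count_residue (m r' : Int) (hm : 0 < m) (hr1 : 0 < r') (hr2 : r' ≤ m) (x : Nat) :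
    (((PySem.List.pyRange 1 ((x : Int) + 1) 1).filter
        (fun n => n % m == r' % m)).length : Int) = ((x : Int) + m - r') / m := by
  induction x with
  | zero =>
      rw [PySem.List.pyRange_one_eq_nil (by omega)]
      simp only [List.filter_nil, List.length_nil, Nat.cast_zero]
      rw [Int.ediv_eq_zero_of_lt (show (0:Int) ≤ 0 + m - r' by omega)
        (show (0:Int) + m - r' < m by omega)]
  | succ x ih =>
      rw [show ((x + 1 : Nat) : Int) + 1 = ((x : Int) + 1) + 1 by push_cast; ring,
        PySem.List.pyRange_one_succ_right (by omega), List.filter_append, List.length_append]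
      have key := ediv_succ ((x : Int) + m - r') m hm
      have hiff : ((x : Int) + 1) % m = r' % m ↔ ((x : Int) + m - r' + 1) % m = 0 := by
        rw [show (x : Int) + m - r' + 1 = ((x : Int) + 1 - r') + m by ring, Int.add_emod_right,
          Int.emod_eq_emod_iff_emod_sub_eq_zero]
      have harr : ((x + 1 : Nat) : Int) + m - r' = ((x : Int) + m - r') + 1 := by push_cast; ring
      by_cases hc : ((x : Int) + 1) % m = r' % m
      · have h1 : (List.filter (fun n => n % m == r' % m) [(x : Int) + 1]).length = 1 := by
          simp [hc]
        rw [h1]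
        push_cast
        rw [ih, show ((x : Int) + 1) + m - r' = ((x : Int) + m - r') + 1 by ring, key,
          if_pos (hiff.mp hc)]
      · have h0 : (List.filter (fun n => n % m == r' % m) [(x : Int) + 1]).length = 0 := by
          simp [hc]
        rw [h0]
        push_cast
        rw [ih]
        rw [show ((x : Int) + 1) + m - r' = ((x : Int) + m - r') + 1 by ring, key,
          if_neg (fun h => hc (hiff.mpr h))]

-- the first comprehension of A counts multiples of K in [1, N]
lemma countA1 (N K : Int) (hK : K ≠ 0) (hN : 0 < N) :
    (((PySem.List.pyRange 1 (N + 1) 1).filter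
        (fun n => PySem.Int.mod n K == 0)).length : Int) = PySem.Int.floordiv N |K| := by
  have hm : 0 < |K| := abs_pos.mpr hK
  have hpred : ∀ n : Int, (PySem.Int.mod n K == 0) = (n % |K| == |K| % |K|) := by
    intro n
    rw [Bool.eq_iff_iff]
    simp only [beq_iff_eq, Int.emod_self]
    rw [pymod_eq_iff_dvd n K 0 (by rcases lt_or_gt_of_ne hK with h | h
                                   · right; omega
                                   · left; omega),
      sub_zero, PySem.Int.emod_eq_zero_iff_dvd, abs_dvd]
  rw [List.filter_congr (fun n _ => hpred n)]
  obtain ⟨x, hx⟩ : ∃ x : Nat, N = (x : Int) := ⟨N.toNat, (Int.toNat_of_nonneg (by omega)).symm⟩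
  subst hx
  rw [count_residue |K| |K| hm hm le_rfl x, PySem.Int.floordiv_eq_ediv_of_pos hm,
    show (x : Int) + |K| - |K| = (x : Int) by ring]

-- the second comprehension of A (K even) counts n in [1, N] with n % K == K // 2
lemma countA2 (N K : Int) (hK : K ≠ 0) (hN : 0 < N) (he : K % 2 = 0) :
    (((PySem.List.pyRange 1 (N + 1) 1).filter
        (fun n => PySem.Int.mod n K == PySem.Int.floordiv K 2)).length : Int)
      = PySem.Int.floordiv (N + PySem.Int.floordiv |K| 2) |K| := by
  have hm : 0 < |K| := abs_pos.mpr hK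
  have habs : |K| = K ∨ |K| = -K := abs_choice K
  have hme : |K| % 2 = 0 := by rcases habs with h | h <;> omega
  have hc2 : PySem.Int.floordiv K 2 = K / 2 := PySem.Int.floordiv_eq_ediv_of_pos (by omega)
  have hm2 : PySem.Int.floordiv |K| 2 = |K| / 2 := PySem.Int.floordiv_eq_ediv_of_pos (by omega)
  have hpred : ∀ n : Int,
      (PySem.Int.mod n K == PySem.Int.floordiv K 2) = (n % |K| == (|K| / 2) % |K|) := by
    intro n
    rw [Bool.eq_iff_iff]
    simp only [beq_iff_eq]
    rw [hc2, pymod_eq_iff_dvd n K (K / 2) (by rcases lt_or_gt_of_ne hK with h | h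
                                              · right; omega
                                              · left; omega)]
    rw [Int.emod_eq_emod_iff_emod_sub_eq_zero, PySem.Int.emod_eq_zero_iff_dvd]
    rcases lt_or_gt_of_ne hK with hneg | hpos
    · rw [abs_of_neg hneg, show -K / 2 = -(K / 2) by omega, sub_neg_eq_add, neg_dvd]
      constructor
      · rintro ⟨t, ht⟩
        exact ⟨t + 1, by rw [mul_add, mul_one]; omega⟩
      · rintro ⟨t, ht⟩
        exact ⟨t - 1, by rw [mul_sub, mul_one]; omega⟩
    · rw [abs_of_pos hpos]
  rw [List.filter_congr (fun n _ => hpred n)]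
  obtain ⟨x, hx⟩ : ∃ x : Nat, N = (x : Int) := ⟨N.toNat, (Int.toNat_of_nonneg (by omega)).symm⟩
  subst hx
  rw [count_residue |K| (|K| / 2) hm (by omega) (by omega) x,
    PySem.Int.floordiv_eq_ediv_of_pos hm, hm2,
    show (x : Int) + |K| - |K| / 2 = (x : Int) + |K| / 2 by omega]

-- ===== VERDICT (by name: the statement is the Claim_ definition above) =====
theorem solve_spec : Claim_equal_solve := by
  intro N K _ hpre
  unfold Spec_solve solve solve_alt
  by_cases hN : N ≤ 0
  · rw [PySem.List.pyRange_one_eq_nil (by omega), if_pos hN]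
    simp
  · have hK : K ≠ 0 := by rcases hpre with h | h; exact h; omega
    rw [if_neg hN]
    simp only [countA1 N K hK (by omega)]
    by_cases he : PySem.Int.mod K 2 == 0
    · have he' : K % 2 = 0 := by
        have h2 := PySem.Int.mod_eq_emod_of_pos (a := K) (show (0:Int) < 2 by omega)
        simpa [h2] using he
      rw [if_pos he, if_pos he, countA2 N K hK (by omega) he']
      ring
    · rw [if_neg he, if_neg he]
      ring
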